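-- pv_equiv track=rewrite | github.com/supernifty/reference-bias | bias/sam.py | bucket
-- ===== SOURCE A (Python) =====
-- def bucket( values, buckets ):
--   '''
--     puts values into buckets
--     @values: list of values
--     @buckets: list of bucket separators with each being the minimum value that can go in that bucket
--   '''
--   result = [ 0 ] * len(buckets)
--   current_bucket = 0
--   for value in sorted( values ):
--     while current_bucket < len(buckets) - 1 and value >= buckets[current_bucket + 1]:
--       current_bucket += 1
--     result[current_bucket] += 1
--   return result
-- ===== SOURCE B (Python) =====
-- def bucket( values, buckets ):
--   '''
--     puts values into buckets
--     @values: list of values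
--     @buckets: list of bucket separators with each being the minimum value that can go in that bucket
--   '''
--   result = [ 0 ] * len(buckets)
--   for value in values:
--     idx = 0
--     for i in range(1, len(buckets)):
--       if value >= buckets[i]:
--         idx = i
--       else:
--         break
--     result[idx] += 1
--   return result
-- ===== Notes on version B (the rewrite author's own statement) =====
-- stated objective: simpler
-- what changed: B drops the sort entirely and classifies each value independently in input order with a fresh forward scan of the separators, instead of A's sort-then-merge with a persistent monotone bucket pointer.
import Mathlib
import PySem

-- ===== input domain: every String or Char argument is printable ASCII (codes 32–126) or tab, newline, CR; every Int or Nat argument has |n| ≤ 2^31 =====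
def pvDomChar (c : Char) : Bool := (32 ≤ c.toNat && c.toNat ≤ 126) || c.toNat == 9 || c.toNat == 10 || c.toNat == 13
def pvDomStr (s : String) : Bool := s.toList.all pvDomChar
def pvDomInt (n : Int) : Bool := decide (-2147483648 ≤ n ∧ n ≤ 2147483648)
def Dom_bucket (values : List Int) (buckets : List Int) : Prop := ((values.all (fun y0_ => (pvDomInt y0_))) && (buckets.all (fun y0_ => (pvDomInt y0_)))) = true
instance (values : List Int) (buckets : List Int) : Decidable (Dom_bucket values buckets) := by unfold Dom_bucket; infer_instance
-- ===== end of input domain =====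

-- B drops the sort and classifies each value independently by a fresh forward scan of the
-- separators (simpler, order-independent); A sorts and keeps a persistent monotone pointer.

-- ===== PORT A =====
-- result[i] += 1 (shared transliteration of 'result[idx] += 1'; in-range under Pre_)
def incAt : List Int → Nat → List Int
  | [], _ => []
  | x :: xs, 0 => (x + 1) :: xs
  | x :: xs, n + 1 => x :: incAt xs n

-- the 'while current_bucket < len(buckets)-1 and value >= buckets[current_bucket+1]' loop
def whileAdv (buckets : List Int) (v : Int) (cb : Nat) : Nat :=
  if h : cb < buckets.length - 1 ∧ buckets.getD (cb + 1) 0 ≤ v then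
    whileAdv buckets v (cb + 1)
  else cb
termination_by buckets.length - cb
decreasing_by omega

def bucket (values : List Int) (buckets : List Int) : List Int :=
  ((PySem.List.sorted values (fun x => x) false).foldl
    (fun st v =>
      let cb := whileAdv buckets v st.2
      (incAt st.1 cb, cb))
    (List.replicate buckets.length 0, 0)).1

-- ===== PORT B =====
-- the 'for i in range(1, len(buckets)): if value >= buckets[i]: idx = i else: break' loop
def scanB (buckets : List Int) (v : Int) (i : Nat) (idx : Nat) : Nat :=
  if h : i < buckets.length then
    if buckets.getD i 0 ≤ v then scanB buckets v (i + 1) i else idx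
  else idx
termination_by buckets.length - i
decreasing_by omega

def bucket_alt (values : List Int) (buckets : List Int) : List Int :=
  values.foldl (fun res v => incAt res (scanB buckets v 1 0))
    (List.replicate buckets.length 0)

-- ===== PRECONDITION & SPEC =====
-- Pre_ excludes only buckets = [] with values ≠ [], where both Pythons raise IndexError.
def Pre_bucket (values : List Int) (buckets : List Int) : Prop :=
  buckets ≠ [] ∨ values = []
instance (values : List Int) (buckets : List Int) : Decidable (Pre_bucket values buckets) := by unfold Pre_bucket; infer_instance
def pvWitness_bucket : List Int × List Int := ([3, 1, 7, 2], [0, 2, 5])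

def Spec_bucket (values : List Int) (buckets : List Int) (out : List Int) : Prop := out = bucket_alt values buckets
instance (values : List Int) (buckets : List Int) (out : List Int) : Decidable (Spec_bucket values buckets out) := by unfold Spec_bucket; infer_instance

-- ===== CLAIM (what is proved, stated in full; the proofs are below) =====
def Claim_equal_bucket : Prop := ∀ (values : List Int) (buckets : List Int), Dom_bucket values buckets → Pre_bucket values buckets → Spec_bucket values buckets (bucket values buckets)

-- ===== LEMMAS AND PROOFS =====

-- B's fresh scan starting just past cb equals A's while-loop started at cb
theorem whileAdv_stop (buckets : List Int) (v : Int) (cb : Nat)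
    (h : ¬ (cb < buckets.length - 1 ∧ buckets.getD (cb + 1) 0 ≤ v)) :
    whileAdv buckets v cb = cb := by
  rw [whileAdv, dif_neg h]

theorem scanB_eq_whileAdv (buckets : List Int) (v : Int) :
    ∀ n cb, buckets.length - cb ≤ n → scanB buckets v (cb + 1) cb = whileAdv buckets v cb := by
  intro n
  induction n with
  | zero =>
    intro cb h
    have h1 : ¬ cb + 1 < buckets.length := by omega
    have h2 : ¬ (cb < buckets.length - 1 ∧ buckets.getD (cb + 1) 0 ≤ v) := by
      intro ⟨h', _⟩; omega
    rw [scanB, dif_neg h1, whileAdv_stop buckets v cb h2]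
  | succ n ih =>
    intro cb h
    by_cases h1 : cb + 1 < buckets.length
    · by_cases h2 : buckets.getD (cb + 1) 0 ≤ v
      · rw [scanB, dif_pos h1, if_pos h2, whileAdv, dif_pos ⟨by omega, h2⟩]
        exact ih (cb + 1) (by omega)
      · rw [scanB, dif_pos h1, if_neg h2,
            whileAdv_stop buckets v cb (fun hc => h2 hc.2)]
    · have h2 : ¬ (cb < buckets.length - 1 ∧ buckets.getD (cb + 1) 0 ≤ v) := by
        intro ⟨h', _⟩; omega
      rw [scanB, dif_neg h1, whileAdv_stop buckets v cb h2]

theorem le_whileAdv (buckets : List Int) (v : Int) :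
    ∀ n cb, buckets.length - cb ≤ n → cb ≤ whileAdv buckets v cb := by
  intro n
  induction n with
  | zero =>
    intro cb h
    have h2 : ¬ (cb < buckets.length - 1 ∧ buckets.getD (cb + 1) 0 ≤ v) := by
      intro ⟨h', _⟩; omega
    rw [whileAdv_stop buckets v cb h2]
  | succ n ih =>
    intro cb h
    rw [whileAdv]
    split
    · exact Nat.le_trans (Nat.le_succ cb) (ih (cb + 1) (by omega))
    · exact Nat.le_refl cb

theorem le_whileAdv' (buckets : List Int) (v : Int) (cb : Nat) : cb ≤ whileAdv buckets v cb :=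
  le_whileAdv buckets v _ cb (Nat.le_refl _)

-- skipping ahead to any point the loop passes through does not change its result
theorem whileAdv_eq_of_le (buckets : List Int) (v : Int) :
    ∀ n a b, b - a ≤ n → a ≤ b → b ≤ whileAdv buckets v a →
      whileAdv buckets v b = whileAdv buckets v a := by
  intro n
  induction n with
  | zero =>
    intro a b h hab _
    have : a = b := by omega
    rw [this]
  | succ n ih =>
    intro a b h hab hbw
    rcases Nat.eq_or_lt_of_le hab with heq | hlt
    · rw [heq]
    · have hstep : whileAdv buckets v a = whileAdv buckets v (a + 1) := by
        by_cases hc : a < buckets.length - 1 ∧ buckets.getD (a + 1) 0 ≤ v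
        · rw [whileAdv, dif_pos hc]
        · exfalso
          rw [whileAdv_stop buckets v a hc] at hbw
          omega
      rw [hstep]
      exact ih (a + 1) b (by omega) hlt (by rw [← hstep]; exact hbw)

-- the stopping point is monotone in the value
theorem whileAdv_mono (buckets : List Int) (v' v : Int) (hv : v' ≤ v) :
    ∀ n cb, buckets.length - cb ≤ n → whileAdv buckets v' cb ≤ whileAdv buckets v cb := by
  intro n
  induction n with
  | zero =>
    intro cb h
    have h2 : ¬ (cb < buckets.length - 1 ∧ buckets.getD (cb + 1) 0 ≤ v') := by
      intro ⟨h', _⟩; omega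
    rw [whileAdv_stop buckets v' cb h2]
    exact le_whileAdv' buckets v cb
  | succ n ih =>
    intro cb h
    by_cases hc : cb < buckets.length - 1 ∧ buckets.getD (cb + 1) 0 ≤ v'
    · rw [whileAdv, dif_pos hc]
      have hstep : whileAdv buckets v cb = whileAdv buckets v (cb + 1) := by
        rw [whileAdv]
        rw [dif_pos ⟨hc.1, le_trans hc.2 hv⟩]
      rw [hstep]
      exact ih (cb + 1) (by omega)
    · rw [whileAdv_stop buckets v' cb hc]
      exact le_whileAdv' buckets v cb

-- incrementing two positions commutes
theorem incAt_comm (r : List Int) : ∀ i j, incAt (incAt r i) j = incAt (incAt r j) i := by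
  induction r with
  | nil => intro i j; rfl
  | cons x xs ih =>
    intro i j
    cases i with
    | zero =>
      cases j with
      | zero => rfl
      | succ j => simp [incAt]
    | succ i =>
      cases j with
      | zero => simp [incAt]
      | succ j => simp [incAt, ih i j]

-- A's stateful fold over a sorted list computes the per-value classification fold
theorem foldA_eq (buckets : List Int) :
    ∀ (l : List Int) (res : List Int) (cb : Nat),
      l.Pairwise (· ≤ ·) → (∀ v ∈ l, cb ≤ whileAdv buckets v 0) →
      (l.foldl (fun st v => let c := whileAdv buckets v st.2; (incAt st.1 c, c)) (res, cb)).1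
        = l.foldl (fun r v => incAt r (whileAdv buckets v 0)) res := by
  intro l
  induction l with
  | nil => intro res cb _ _; rfl
  | cons v t ih =>
    intro res cb hp hcb
    have hcbv : cb ≤ whileAdv buckets v 0 := hcb v (List.mem_cons_self ..)
    have hkey : whileAdv buckets v cb = whileAdv buckets v 0 :=
      whileAdv_eq_of_le buckets v cb 0 cb (Nat.le_refl _) (Nat.zero_le _) hcbv
    simp only [List.foldl_cons, hkey]
    apply ih
    · exact hp.of_cons
    · intro v'' hv''
      exact hkey ▸ (hkey ▸ whileAdv_mono buckets v v'' ((List.pairwise_cons.mp hp).1 v'' hv'') _ 0 (Nat.le_refl _))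

-- ===== VERDICT (by name: the statement is the Claim_ definition above) =====
theorem bucket_spec : Claim_equal_bucket := by
  intro values buckets _ _
  unfold Spec_bucket bucket bucket_alt
  rw [foldA_eq buckets _ _ 0
      (by simpa using PySem.List.sorted_pairwise values (fun x => x))
      (fun v _ => Nat.zero_le _)]
  have hperm : (PySem.List.sorted values (fun x => x) false).Perm values :=
    PySem.List.sorted_perm values (fun x => x) false
  rw [hperm.foldl_eq' (fun x _ y _ z => incAt_comm z (whileAdv buckets x 0) (whileAdv buckets y 0))]
  have hscan : ∀ v : Int, scanB buckets v 1 0 = whileAdv buckets v 0 := fun v => by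
    simpa using scanB_eq_whileAdv buckets v buckets.length 0 (by omega)
  simp only [hscan]
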